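-- pv_equiv track=rewrite | github.com/TooMuchBrainProjects/cloudflight-coding-contest | code.py | get_grids
-- ===== SOURCE A (Python) =====
-- def get_grids(file):
--     file = file[2:]
--     grids = []
--
--     grid = []
--     for line in file:
--         if (line != ""):
--             grid.append(list(line))
--         else:
--            grids.append(grid)
--            grid = []
--
--     grids.append(grid)
--     return grids
-- ===== SOURCE B (Python) =====
-- def get_grids(file):
--     lines = file[2:]
--     bounds = [-1] + [i for i, l in enumerate(lines) if l == ""] + [len(lines)]
--     return [[list(x) for x in lines[lo + 1:hi]]
--             for lo, hi in zip(bounds, bounds[1:])]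
-- ===== Notes on version B (the rewrite author's own statement) =====
-- stated objective: alternative
-- what changed: Replaces the flush-on-blank accumulator loop by a two-pass index computation: collect blank-line indices with -1/len sentinels, then slice each region between consecutive boundaries.
import Mathlib
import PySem

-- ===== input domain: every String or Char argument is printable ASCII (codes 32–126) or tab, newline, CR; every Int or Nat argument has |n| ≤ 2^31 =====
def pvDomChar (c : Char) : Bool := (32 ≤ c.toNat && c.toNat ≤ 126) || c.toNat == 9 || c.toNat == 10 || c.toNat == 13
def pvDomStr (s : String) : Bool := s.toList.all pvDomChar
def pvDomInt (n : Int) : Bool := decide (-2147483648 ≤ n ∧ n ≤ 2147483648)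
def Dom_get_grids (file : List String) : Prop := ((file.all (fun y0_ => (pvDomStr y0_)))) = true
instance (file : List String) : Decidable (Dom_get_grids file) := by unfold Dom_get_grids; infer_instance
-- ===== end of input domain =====

-- B replaces A's flush-on-blank accumulator loop by a two-pass decomposition: collect blank-line
-- indices with -1/len sentinels, then slice each region between consecutive boundaries (alternative, same cost).

-- ===== PORT A =====
-- list(line): the line's characters as one-character strings
def pvChars (s : String) : List String := s.toList.map (fun c => String.singleton c)

-- the body of A's for-loop: state = (grids, grid)
def pvStepA (st : List (List (List String)) × List (List String)) (line : String) :
    List (List (List String)) × List (List String) :=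
  if line ≠ "" then (st.1, st.2 ++ [pvChars line]) else (st.1 ++ [st.2], ([] : List (List String)))

def get_grids (file : List String) : List (List (List String)) :=
  let file' := PySem.List.slice file (some 2) none        -- file = file[2:]
  let st := file'.foldl pvStepA ([], [])
  st.1 ++ [st.2]                                          -- grids.append(grid); return grids

-- ===== PORT B =====
-- [i for i, l in enumerate(lines) if l == ""]
def pvBlanks (lines : List String) : List Int :=
  (PySem.List.enumerate lines).filterMap (fun p => if p.2 = "" then some p.1 else none)

-- [-1] + blanks + [len(lines)]
def pvBounds (lines : List String) : List Int :=
  [-1] ++ pvBlanks lines ++ [(lines.length : Int)]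

-- [list(x) for x in lines[lo+1:hi]]
def pvGrid (lines : List String) (p : Int × Int) : List (List String) :=
  (PySem.List.slice lines (some (p.1 + 1)) (some p.2)).map pvChars

def get_grids_alt (file : List String) : List (List (List String)) :=
  let lines := PySem.List.slice file (some 2) none        -- lines = file[2:]
  let bounds := pvBounds lines
  (bounds.zip (PySem.List.slice bounds (some 1) none)).map (pvGrid lines)   -- zip(bounds, bounds[1:])

-- ===== PRECONDITION & SPEC =====
def Spec_get_grids (file : List String) (out : List (List (List String))) : Prop := out = get_grids_alt file
instance (file : List String) (out : List (List (List String))) : Decidable (Spec_get_grids file out) := by unfold Spec_get_grids; infer_instance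

-- ===== CLAIM (what is proved, stated in full; the proofs are below) =====
def Claim_equal_get_grids : Prop := ∀ (file : List String), Dom_get_grids file → Spec_get_grids file (get_grids file)

-- ===== LEMMAS AND PROOFS =====

-- the common intermediate value: the list of grids, split on blank lines
def pvSplit : List String → List (List (List String))
  | [] => [[]]
  | l :: t =>
    if l = "" then [] :: pvSplit t
    else match pvSplit t with
      | [] => [[pvChars l]]
      | g :: gs => (pvChars l :: g) :: gs

theorem pvSplit_ne_nil (ls : List String) : pvSplit ls ≠ [] := by
  cases ls with
  | nil => simp [pvSplit]
  | cons l t =>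
    simp only [pvSplit]
    split
    · simp
    · split <;> simp

-- A's loop, generalized over the accumulator
theorem pvLoopA (ls : List String) : ∀ (gs : List (List (List String))) (g : List (List String)),
    (ls.foldl pvStepA (gs, g)).1 ++ [(ls.foldl pvStepA (gs, g)).2]
      = gs ++ (pvSplit ls).modifyHead (g ++ ·) := by
  induction ls with
  | nil => intro gs g; simp [pvSplit]
  | cons l t ih =>
    intro gs g
    rcases hsp : pvSplit t with _ | ⟨g', gs'⟩
    · exact absurd hsp (pvSplit_ne_nil t)
    by_cases h : l = ""
    · subst h
      have hstep : pvStepA (gs, g) "" = (gs ++ [g], []) := by simp [pvStepA]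
      rw [List.foldl_cons, hstep, ih, hsp]
      simp [pvSplit, hsp]
    · have hstep : pvStepA (gs, g) l = (gs, g ++ [pvChars l]) := by simp [pvStepA, h]
      rw [List.foldl_cons, hstep, ih, hsp]
      simp [pvSplit, h, hsp]

theorem getA_eq_split (file : List String) :
    get_grids file = pvSplit (PySem.List.slice file (some 2) none) := by
  show (_ : _ × _).1 ++ _ = _
  rw [pvLoopA]
  rcases hsp : pvSplit (PySem.List.slice file (some 2) none) with _ | ⟨g', gs'⟩
  · exact absurd hsp (pvSplit_ne_nil _)
  · simp

-- B side ------------------------------------------------------------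

-- blank indices counted from an arbitrary start
def pvBlanksF (lines : List String) (s : Int) : List Int :=
  (PySem.List.enumerate lines s).filterMap (fun p => if p.2 = "" then some p.1 else none)

theorem pvBlanks_eq (lines : List String) : pvBlanks lines = pvBlanksF lines 0 := rfl

theorem pvBlanksF_cons (l : String) (t : List String) (s : Int) :
    pvBlanksF (l :: t) s = if l = "" then s :: pvBlanksF t (s + 1) else pvBlanksF t (s + 1) := by
  simp only [pvBlanksF, PySem.List.enumerate_cons, List.filterMap_cons]
  split <;> simp_all

theorem pvBlanksF_shift (t : List String) : ∀ s : Int,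
    pvBlanksF t (s + 1) = (pvBlanksF t s).map (· + 1) := by
  induction t with
  | nil => intro s; rfl
  | cons l t ih =>
    intro s
    rw [pvBlanksF_cons, pvBlanksF_cons]
    split <;> simp [ih (s + 1)]

theorem pvBlanksF_nonneg (t : List String) : ∀ (s x : Int), x ∈ pvBlanksF t s → s ≤ x := by
  induction t with
  | nil => intro s x hx; simp [pvBlanksF] at hx
  | cons l t ih =>
    intro s x hx
    rw [pvBlanksF_cons] at hx
    split at hx
    · rcases List.mem_cons.mp hx with h | h
      · omega
      · have := ih (s + 1) x h; omega
    · have := ih (s + 1) x hx; omega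

-- the tail of pvBounds
def pvQ (lines : List String) : List Int := pvBlanksF lines 0 ++ [(lines.length : Int)]

theorem pvBounds_eq (lines : List String) : pvBounds lines = -1 :: pvQ lines := by
  simp [pvBounds, pvQ, pvBlanks_eq]

theorem pvQ_ne_nil (lines : List String) : pvQ lines ≠ [] := by simp [pvQ]

theorem pvQ_nonneg (lines : List String) : ∀ x ∈ pvQ lines, 0 ≤ x := by
  intro x hx
  rcases List.mem_append.mp hx with h | h
  · exact pvBlanksF_nonneg lines 0 x h
  · simp at h; omega

theorem pvQ_cons (l : String) (t : List String) :
    pvQ (l :: t) = if l = "" then 0 :: (pvQ t).map (· + 1) else (pvQ t).map (· + 1) := by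
  simp only [pvQ, pvBlanksF_cons, pvBlanksF_shift, List.map_append, List.map_cons, List.map_nil,
    List.length_cons]
  split <;> simp

-- consecutive pairs
def pvPairs (b : List Int) : List (Int × Int) := b.zip b.tail

theorem pvPairs_cons_cons (x y : Int) (r : List Int) :
    pvPairs (x :: y :: r) = (x, y) :: pvPairs (y :: r) := rfl

theorem pvPairs_map (f : Int → Int) (b : List Int) :
    pvPairs (b.map f) = (pvPairs b).map (Prod.map f f) := by
  simp [pvPairs, ← List.map_tail, List.zip_map]

theorem mem_pvPairs (b : List Int) (p : Int × Int) (hp : p ∈ pvPairs b) : p.1 ∈ b ∧ p.2 ∈ b := by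
  obtain ⟨a, c⟩ := p
  have := List.of_mem_zip hp
  exact ⟨this.1, List.mem_of_mem_tail this.2⟩

-- B's result on the trimmed lines
def pvBody (lines : List String) : List (List (List String)) :=
  (pvPairs (pvBounds lines)).map (pvGrid lines)

theorem getAlt_eq_body (file : List String) :
    get_grids_alt file = pvBody (PySem.List.slice file (some 2) none) := by
  simp [get_grids_alt, pvBody, pvPairs, PySem.List.slice_from_one]

-- shifting a nonnegative slice past a cons cell
theorem slice_shift (x : String) (xs : List String) (a b : Int) (ha : 0 ≤ a) (hb : 0 ≤ b) :
    PySem.List.slice (x :: xs) (some (a + 1)) (some (b + 1)) = PySem.List.slice xs (some a) (some b) := by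
  rw [PySem.List.slice_toNat _ (by omega) (by omega), PySem.List.slice_toNat _ ha hb]
  have h1 : (a + 1).toNat = a.toNat + 1 := by omega
  have h2 : (b + 1).toNat = b.toNat + 1 := by omega
  rw [h1, h2, List.drop_succ_cons]
  congr 1
  omega

theorem pvGrid_shift (x : String) (xs : List String) (p : Int × Int)
    (h1 : 0 ≤ p.1 + 1) (h2 : 0 ≤ p.2) :
    pvGrid (x :: xs) (Prod.map (· + 1) (· + 1) p) = pvGrid xs p := by
  obtain ⟨a, b⟩ := p
  simp only [pvGrid, Prod.map]
  rw [show a + 1 + 1 = (a + 1) + 1 by ring, slice_shift x xs (a + 1) b (by simpa using h1) h2]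

theorem pvGrids_shift (x : String) (xs : List String) (ps : List (Int × Int))
    (h : ∀ p ∈ ps, 0 ≤ p.1 + 1 ∧ 0 ≤ p.2) :
    (ps.map (Prod.map (· + 1) (· + 1))).map (pvGrid (x :: xs)) = ps.map (pvGrid xs) := by
  rw [List.map_map]
  exact List.map_congr_left (fun p hp => pvGrid_shift x xs p (h p hp).1 (h p hp).2)

theorem pvBody_eq_split (lines : List String) : pvBody lines = pvSplit lines := by
  induction lines with
  | nil => decide
  | cons l t ih =>
    rcases hq : pvQ t with _ | ⟨z, r⟩
    · exact absurd hq (pvQ_ne_nil t)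
    have hz : 0 ≤ z := pvQ_nonneg t z (by rw [hq]; exact List.mem_cons_self ..)
    have hmem : ∀ p ∈ pvPairs (z :: r), 0 ≤ p.1 + 1 ∧ 0 ≤ p.2 := by
      intro p hp
      have ⟨h1, h2⟩ := mem_pvPairs _ p hp
      have n1 := pvQ_nonneg t p.1 (by rw [hq]; exact h1)
      have n2 := pvQ_nonneg t p.2 (by rw [hq]; exact h2)
      omega
    have hbody_t : pvBody t = pvGrid t (-1, z) :: (pvPairs (z :: r)).map (pvGrid t) := by
      simp [pvBody, pvBounds_eq, hq, pvPairs_cons_cons]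
    by_cases h : l = ""
    · subst h
      have hqc : pvQ ("" :: t) = 0 :: (pvQ t).map (· + 1) := by rw [pvQ_cons]; simp
      have : pvBody ("" :: t) = [] :: pvBody t := by
        rw [pvBody, pvBounds_eq, hqc, hq]
        simp only [List.map_cons]
        rw [pvPairs_cons_cons, pvPairs_cons_cons]
        have hpm : pvPairs ((z + 1) :: r.map (· + 1)) = (pvPairs (z :: r)).map (Prod.map (· + 1) (· + 1)) := by
          simpa using pvPairs_map (· + 1) (z :: r)
        rw [List.map_cons, List.map_cons, hpm, pvGrids_shift _ _ _ hmem, hbody_t]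
        congr 1
        -- remaining: pvGrid (""::t) (0, z+1) = pvGrid t (-1, z)
        simp only [pvGrid]
        rw [slice_shift "" t 0 z (by omega) hz]
        norm_num
      rw [this, ih, pvSplit, if_pos rfl]
    · have : pvBody (l :: t) = (pvChars l :: pvGrid t (-1, z)) :: (pvPairs (z :: r)).map (pvGrid t) := by
        rw [pvBody, pvBounds_eq, pvQ_cons]
        simp only [if_neg h, hq, List.map_cons]
        rw [pvPairs_cons_cons]
        have hpm : pvPairs ((z + 1) :: r.map (· + 1)) = (pvPairs (z :: r)).map (Prod.map (· + 1) (· + 1)) := by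
          simpa using pvPairs_map (· + 1) (z :: r)
        rw [List.map_cons, hpm, pvGrids_shift _ _ _ hmem]
        congr 1
        -- pvGrid (l::t) (-1, z+1) = pvChars l :: pvGrid t (-1, z)
        simp only [pvGrid]
        rw [PySem.List.slice_toNat _ (by omega) (by omega),
            PySem.List.slice_toNat _ (by omega) (by omega)]
        have h1 : ((-1:Int) + 1).toNat = 0 := by omega
        have h2 : (z + 1).toNat = z.toNat + 1 := by omega
        simp [h2]
      rw [this, pvSplit, if_neg h, ← ih, hbody_t]

-- ===== VERDICT (by name: the statement is the Claim_ definition above) =====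
theorem get_grids_spec : Claim_equal_get_grids := by
  intro file _
  show get_grids file = get_grids_alt file
  rw [getA_eq_split, getAlt_eq_body, pvBody_eq_split]
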